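-- pv_equiv track=rewrite | github.com/HidenLee/BaekjoonHub | 프로그래머스/2/76502. 괄호 회전하기/괄호 회전하기.py | solution
-- ===== SOURCE A (Python) =====
-- def solution(s):
--     answer = 0
--     dic = {"[":"]","{":"}","(":")"}
--     for idx in range(len(s)):
--         count = 0
--         stack = []
--         flag = True
--         while count < len(s) and flag:
--             elm = s[(idx+count)%len(s)]
--             if elm in ["[","{","("]:
--                 stack.append(elm)
--             else:
--                 if stack and dic[stack[-1]] == elm:
--                     stack.pop()
--                 else:
--                     flag = False
--                     break
--             count += 1
--         answer += 1 if flag and not stack else 0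
--     return answer
-- ===== SOURCE B (Python) =====
-- def solution(s):
--     pairs = ("()", "[]", "{}")
--     answer = 0
--     for idx in range(len(s)):
--         r = s[idx:] + s[:idx]
--         i = 0
--         while i + 1 < len(r):
--             if r[i:i+2] in pairs:
--                 r = r[:i] + r[i+2:]
--                 i = i - 1 if i > 0 else 0
--             else:
--                 i += 1
--         answer += 1 if r == "" else 0
--     return answer
-- ===== Notes on version B (the rewrite author's own statement) =====
-- stated objective: alternative
-- what changed: Per rotation, A scans with a stack over modular indices; B builds the concrete rotated string and repeatedly deletes adjacent matched bracket pairs (with a one-step backtrack) until none remain, counting the rotation iff the string empties.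
import Mathlib
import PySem

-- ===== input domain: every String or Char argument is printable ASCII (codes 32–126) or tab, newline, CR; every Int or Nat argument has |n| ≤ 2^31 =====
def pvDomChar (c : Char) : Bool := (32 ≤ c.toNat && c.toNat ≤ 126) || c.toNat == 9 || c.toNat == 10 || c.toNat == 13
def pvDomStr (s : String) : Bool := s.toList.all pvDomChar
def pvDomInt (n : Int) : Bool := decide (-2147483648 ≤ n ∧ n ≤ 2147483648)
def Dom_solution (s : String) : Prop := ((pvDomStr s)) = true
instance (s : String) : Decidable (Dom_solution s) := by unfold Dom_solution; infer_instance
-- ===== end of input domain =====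

-- B replaces A's modular-index stack scan by building each rotation explicitly and
-- repeatedly deleting adjacent matched bracket pairs until none remain (objective: alternative).

-- ===== PORT A =====
-- dic = {"[":"]","{":"}","(":")"}
def pvDicA : PySem.Dict Char Char := PySem.Dict.ofList [('[', ']'), ('{', '}'), ('(', ')')]

-- A's inner while loop: state (count, stack); the Python stack's TOP (stack[-1]) is the list
-- head here, append = cons, pop = tail.  s[(idx+count)%len(s)] has a nonnegative in-range
-- index inside the loop (count < len), so List.getD is exact for Python's indexing here.
-- dic[stack[-1]] cannot raise in Python (the stack holds only openers); getD with a dummy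
-- default is exact.
def pvALoop (cs : List Char) (idx : Nat) : Nat → List Char → Bool × List Char
  | count, stack =>
    if _h : count < cs.length then
      let elm := cs.getD ((idx + count) % cs.length) ' '
      if elm = '[' ∨ elm = '{' ∨ elm = '(' then
        pvALoop cs idx (count + 1) (elm :: stack)
      else
        match stack with
        | top :: rest =>
          if pvDicA.getD top ' ' = elm then pvALoop cs idx (count + 1) rest
          else (false, top :: rest)
        | [] => (false, [])
    else (true, stack)
  termination_by count _ => cs.length - count

-- for idx in range(len(s)): … answer += 1 if flag and not stack else 0
def solution (s : String) : Int :=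
  let cs := s.toList
  (List.range cs.length).foldl
    (fun answer idx =>
      let res := pvALoop cs idx 0 []
      answer + if res.1 = true ∧ res.2 = [] then 1 else 0)
    0

-- ===== PORT B =====
-- r[i:i+2] in ("()", "[]", "{}")
def pvIsPair (a b : Char) : Bool :=
  (a = '(' && b = ')') || (a = '[' && b = ']') || (a = '{' && b = '}')

-- B's inner while loop: indices i and i+1 are in range when tested (i+1 < len), so getD is
-- exact; r[:i] + r[i+2:] is take i ++ drop (i+2) for these in-range bounds, and Python's
-- max(i - 1, 0) is Nat's truncated i - 1.
def pvBLoop : List Char → Nat → List Char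
  | r, i =>
    if h : i + 1 < r.length then
      if pvIsPair (r.getD i ' ') (r.getD (i + 1) ' ') then
        pvBLoop (r.take i ++ r.drop (i + 2)) (i - 1)
      else pvBLoop r (i + 1)
    else r
  termination_by r i => 2 * r.length - i
  decreasing_by
    · have hi : i ≤ r.length := by omega
      simp only [List.length_append, List.length_take, List.length_drop, Nat.min_eq_left hi]
      omega
    · omega

-- for idx in range(len(s)): r = s[idx:] + s[:idx]; … ; answer += 1 if r == "" else 0
def solution_alt (s : String) : Int :=
  let cs := s.toList
  (List.range cs.length).foldl
    (fun answer idx =>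
      let r := pvBLoop (cs.drop idx ++ cs.take idx) 0
      answer + if r = [] then 1 else 0)
    0

-- ===== PRECONDITION & SPEC =====
def Spec_solution (s : String) (out : Int) : Prop := out = solution_alt s
instance (s : String) (out : Int) : Decidable (Spec_solution s out) := by unfold Spec_solution; infer_instance

-- ===== CLAIM (what is proved, stated in full; the proofs are below) =====
def Claim_equal_solution : Prop := ∀ (s : String), Dom_solution s → Spec_solution s (solution s)

-- ===== LEMMAS AND PROOFS =====

-- Reference scan: A's stack check, written as structural recursion over the char list.
def pvScan : List Char → List Char → Bool × List Char
  | [], st => (true, st)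
  | c :: rest, st =>
    if c = '[' ∨ c = '{' ∨ c = '(' then pvScan rest (c :: st)
    else
      match st with
      | t :: r => if pvDicA.getD t ' ' = c then pvScan rest r else (false, t :: r)
      | [] => (false, [])

theorem pvScan_nil (st : List Char) : pvScan [] st = (true, st) := rfl

theorem pvScan_cons (c : Char) (rest st : List Char) :
    pvScan (c :: rest) st =
      (if c = '[' ∨ c = '{' ∨ c = '(' then pvScan rest (c :: st)
       else
         match st with
         | t :: r => if pvDicA.getD t ' ' = c then pvScan rest r else (false, t :: r)
         | [] => (false, [])) := rfl

def pvOpener (c : Char) : Prop := c = '[' ∨ c = '{' ∨ c = '('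

-- A's loop equals pvScan on the remaining suffix of the rotation.
theorem pvALoop_eq_scan (cs : List Char) (idx : Nat) (hidx : idx < cs.length) :
    ∀ count stack, pvALoop cs idx count stack = pvScan ((cs.rotate idx).drop count) stack := by
  have main : ∀ n count stack, cs.length - count = n →
      pvALoop cs idx count stack = pvScan ((cs.rotate idx).drop count) stack := by
    intro n
    induction n using Nat.strong_induction_on with
    | _ n ih =>
      intro count stack hn
      rw [pvALoop]
      by_cases h : count < cs.length
      · have hlen : (cs.rotate idx).length = cs.length := List.length_rotate cs idx
        have hc : count < (cs.rotate idx).length := by omega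
        have hdrop : (cs.rotate idx).drop count
            = (cs.rotate idx)[count] :: (cs.rotate idx).drop (count + 1) :=
          List.drop_eq_getElem_cons hc
        have hget := List.getElem_rotate cs idx count hc
        have hgetD : cs.getD ((idx + count) % cs.length) ' ' = (cs.rotate idx)[count] := by
          rw [hget, Nat.add_comm idx count,
            List.getD_eq_getElem cs ' ' (Nat.mod_lt _ (by omega))]
        simp only [dif_pos h, hdrop]
        rw [pvScan_cons, hgetD]
        by_cases hop : (cs.rotate idx)[count] = '[' ∨ (cs.rotate idx)[count] = '{' ∨
            (cs.rotate idx)[count] = '('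
        · simp only [hop, if_true]
          exact ih (cs.length - (count + 1)) (by omega) (count + 1) _ rfl
        · simp only [hop, if_false]
          cases stack with
          | nil => rfl
          | cons t r =>
            by_cases hm : pvDicA.getD t ' ' = (cs.rotate idx)[count]
            · simp only [hm, if_true]
              exact ih (cs.length - (count + 1)) (by omega) (count + 1) _ rfl
            · simp only [hm, if_false]
      · simp only [dif_neg h]
        have hnil : (cs.rotate idx).drop count = [] := by
          apply List.drop_eq_nil_of_le
          rw [List.length_rotate]; omega
        rw [hnil, pvScan_nil]
  exact fun count stack => main (cs.length - count) count stack rfl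

-- Scanning a concatenation runs the two parts in sequence, stopping on failure.
theorem pvScan_append (u v : List Char) (st : List Char) :
    pvScan (u ++ v) st =
      (if (pvScan u st).1 then pvScan v (pvScan u st).2 else pvScan u st) := by
  induction u generalizing st with
  | nil => simp [pvScan_nil]
  | cons c rest ih =>
    simp only [List.cons_append]
    rw [pvScan_cons, pvScan_cons]
    by_cases hop : c = '[' ∨ c = '{' ∨ c = '('
    · simp only [hop, if_true]; exact ih _
    · simp only [hop, if_false]
      cases st with
      | nil => simp
      | cons t r =>
        by_cases hm : pvDicA.getD t ' ' = c
        · simp only [hm, if_true]; exact ih _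
        · simp only [hm, if_false]; simp

-- A matched adjacent pair is a no-op for the scan.
theorem pvScan_pair (a b : Char) (h : pvIsPair a b = true) (v st : List Char) :
    pvScan (a :: b :: v) st = pvScan v st := by
  simp only [pvIsPair, Bool.or_eq_true, Bool.and_eq_true, decide_eq_true_eq] at h
  obtain (⟨rfl, rfl⟩ | ⟨rfl, rfl⟩) | ⟨rfl, rfl⟩ := h
  · rw [pvScan_cons, if_pos (by decide : ('(' : Char) = '[' ∨ ('(' : Char) = '{' ∨ ('(' : Char) = '(')]
    rw [pvScan_cons, if_neg (by decide : ¬((')' : Char) = '[' ∨ (')' : Char) = '{' ∨ (')' : Char) = '('))]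
    show (if pvDicA.getD '(' ' ' = ')' then pvScan v st else (false, '(' :: st)) = pvScan v st
    rw [if_pos (by decide)]
  · rw [pvScan_cons, if_pos (by decide : ('[' : Char) = '[' ∨ ('[' : Char) = '{' ∨ ('[' : Char) = '(')]
    rw [pvScan_cons, if_neg (by decide : ¬((']' : Char) = '[' ∨ (']' : Char) = '{' ∨ (']' : Char) = '('))]
    show (if pvDicA.getD '[' ' ' = ']' then pvScan v st else (false, '[' :: st)) = pvScan v st
    rw [if_pos (by decide)]
  · rw [pvScan_cons, if_pos (by decide : ('{' : Char) = '[' ∨ ('{' : Char) = '{' ∨ ('{' : Char) = '(')]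
    rw [pvScan_cons, if_neg (by decide : ¬(('}' : Char) = '[' ∨ ('}' : Char) = '{' ∨ ('}' : Char) = '('))]
    show (if pvDicA.getD '{' ' ' = '}' then pvScan v st else (false, '{' :: st)) = pvScan v st
    rw [if_pos (by decide)]

-- Deleting a matched adjacent pair anywhere preserves the scan.
theorem pvScan_delete (u : List Char) (a b : Char) (h : pvIsPair a b = true)
    (v st : List Char) : pvScan (u ++ a :: b :: v) st = pvScan (u ++ v) st := by
  rw [pvScan_append, pvScan_append, pvScan_pair a b h]

-- Splitting the list at an in-range index i into take/element/element/drop.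
theorem pvSplit (r : List Char) (i : Nat) (h : i + 1 < r.length) :
    r = r.take i ++ r[i]'(by omega) :: r[i+1]'(by omega) :: r.drop (i + 2) := by
  conv_lhs => rw [← List.take_append_drop i r]
  congr 1
  rw [List.drop_eq_getElem_cons (by omega : i < r.length)]
  congr 1
  rw [List.drop_eq_getElem_cons (by omega : i + 1 < r.length)]

-- B's elimination loop preserves the scan.
theorem pvBLoop_scan (r : List Char) (i : Nat) (st : List Char) :
    pvScan (pvBLoop r i) st = pvScan r st := by
  induction r, i using pvBLoop.induct with
  | case1 r i h hp ih =>
    rw [pvBLoop, dif_pos h, if_pos hp, ih]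
    have hgi : r.getD i ' ' = r[i]'(by omega) := List.getD_eq_getElem r ' ' (by omega)
    have hgi1 : r.getD (i+1) ' ' = r[i+1]'h := List.getD_eq_getElem r ' ' h
    rw [hgi, hgi1] at hp
    conv_rhs => rw [pvSplit r i h]
    rw [pvScan_delete _ _ _ hp]
  | case2 r i h hp ih => rw [pvBLoop, dif_pos h, if_neg hp, ih]
  | case3 r i h => rw [pvBLoop, dif_neg h]

def pvNoPair (r : List Char) : Prop :=
  ∀ j, j + 1 < r.length → pvIsPair (r.getD j ' ') (r.getD (j+1) ' ') = false

-- B's loop result has no adjacent matched pair left.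
theorem pvBLoop_noPair (r : List Char) (i : Nat)
    (hpre : ∀ j, j + 1 < r.length → j < i → pvIsPair (r.getD j ' ') (r.getD (j+1) ' ') = false) :
    pvNoPair (pvBLoop r i) := by
  induction r, i using pvBLoop.induct with
  | case1 r i h hp ih =>
    rw [pvBLoop, dif_pos h, if_pos hp]
    apply ih
    intro j hj hji
    -- indices below i - 1 lie wholly in the unchanged take-i prefix
    have hji' : j + 1 < i := by omega
    have e1 : (r.take i ++ r.drop (i+2)).getD j ' ' = r.getD j ' ' := by
      rw [List.getD_append _ _ _ _ (by simp [List.length_take]; omega),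
        List.getD_eq_getElem _ _ (by simp [List.length_take]; omega),
        List.getElem_take, ← List.getD_eq_getElem r ' ' (by omega)]
    have e2 : (r.take i ++ r.drop (i+2)).getD (j+1) ' ' = r.getD (j+1) ' ' := by
      rw [List.getD_append _ _ _ _ (by simp [List.length_take]; omega),
        List.getD_eq_getElem _ _ (by simp [List.length_take]; omega),
        List.getElem_take, ← List.getD_eq_getElem r ' ' (by omega)]
    rw [e1, e2]
    exact hpre j (by omega) (by omega)
  | case2 r i h hp ih =>
    rw [pvBLoop, dif_pos h, if_neg hp]
    apply ih
    intro j hj hji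
    rcases Nat.lt_or_ge j i with hlt | hge
    · exact hpre j hj hlt
    · have hj_eq : j = i := by omega
      subst hj_eq
      exact Bool.of_not_eq_true hp
  | case3 r i h =>
    rw [pvBLoop, dif_neg h]
    intro j hj
    exact hpre j hj (by omega)

-- An opener whose dict value matches the next char forms a pair.
theorem pvOpener_close_pair (a b : Char) (ha : pvOpener a) (hm : pvDicA.getD a ' ' = b) :
    pvIsPair a b = true := by
  rcases ha with h | h | h <;> subst h <;> subst hm <;> decide

-- A nonempty pair-free string never scans to success with an empty stack,
-- starting from an opener-only stack whose top does not match the first char.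
theorem pvScan_noPair_fail : ∀ (r st : List Char), pvNoPair r →
    (∀ c ∈ st, pvOpener c) → (r = [] → st ≠ []) →
    (∀ t st' c rest, st = t :: st' → r = c :: rest → pvIsPair t c = false) →
    pvScan r st ≠ (true, []) := by
  intro r
  induction r with
  | nil =>
    intro st _ _ hne _
    rw [pvScan_nil]
    intro hcontra
    have : st = [] := by injection hcontra
    exact hne rfl this
  | cons c rest ih =>
    intro st hnp hst hne htop
    rw [pvScan_cons]
    by_cases hop : c = '[' ∨ c = '{' ∨ c = '('
    · simp only [hop, if_true]
      apply ih
      · intro j hj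
        have := hnp (j+1) (by simp at hj ⊢; omega)
        simpa using this
      · intro x hx
        rcases List.mem_cons.mp hx with h | h
        · subst h; exact hop
        · exact hst x h
      · intro _; exact List.cons_ne_nil c st
      · intro t st' c' rest' hst' hr'
        injection hst' with h1 _
        subst h1
        have := hnp 0 (by simp [hr'])
        simpa [hr'] using this
    · simp only [hop, if_false]
      cases st with
      | nil => simp
      | cons t str =>
        by_cases hm : pvDicA.getD t ' ' = c
        · exfalso
          have hto : pvOpener t := hst t List.mem_cons_self
          have hfalse := htop t str c rest rfl rfl
          rw [pvOpener_close_pair t c hto hm] at hfalse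
          exact absurd hfalse (by simp)
        · simp [hm]

-- Per rotation: B's emptiness test equals A's stack-scan success.
theorem pvRot_equiv (rot : List Char) :
    (pvBLoop rot 0 = []) ↔ (pvScan rot [] = (true, [])) := by
  constructor
  · intro h
    have hsc := pvBLoop_scan rot 0 []
    rw [h] at hsc
    rw [← hsc, pvScan_nil]
  · intro h
    by_contra hne
    have hnp : pvNoPair (pvBLoop rot 0) := pvBLoop_noPair rot 0 (by intro j _ hj; omega)
    have hscan : pvScan (pvBLoop rot 0) [] = (true, []) := by
      rw [pvBLoop_scan]; exact h
    exact pvScan_noPair_fail (pvBLoop rot 0) [] hnp (by simp) (fun h' => absurd h' hne)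
      (by intro t st' c r h1 _; exact absurd h1 (by simp)) hscan

-- ===== VERDICT (by name: the statement is the Claim_ definition above) =====
theorem solution_spec : Claim_equal_solution := by
  intro s _
  unfold Spec_solution solution solution_alt
  simp only
  apply PySem.List.foldl_congr_mem
  intro answer idx hidx
  have hidxlt : idx < s.toList.length := List.mem_range.mp hidx
  have hrot : s.toList.drop idx ++ s.toList.take idx = s.toList.rotate idx :=
    (List.rotate_eq_drop_append_take (le_of_lt hidxlt)).symm
  have hA : pvALoop s.toList idx 0 [] = pvScan (s.toList.rotate idx) [] := by
    rw [pvALoop_eq_scan s.toList idx hidxlt 0 []]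
    simp
  rw [hrot, hA]
  congr 1
  rcases (pvRot_equiv (s.toList.rotate idx)) with ⟨h1, h2⟩
  by_cases hb : pvBLoop (s.toList.rotate idx) 0 = []
  · rw [h1 hb, hb]
    simp
  · have hs : pvScan (s.toList.rotate idx) [] ≠ (true, []) := fun hc => hb (h2 hc)
    rw [if_neg hb, if_neg]
    intro hcon
    apply hs
    obtain ⟨hf, hst⟩ := hcon
    have hpair : pvScan (s.toList.rotate idx) []
        = ((pvScan (s.toList.rotate idx) []).1, (pvScan (s.toList.rotate idx) []).2) := rfl
    rw [hpair, hf, hst]
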